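-- pv_equiv track=rewrite | github.com/kiwidude68/calibre_plugins | find_duplicates/book_algorithms.py | clean_dup_groups
-- ===== SOURCE A (Python) =====
-- def clean_dup_groups(candidates_map):
--     '''
--     Given a dictionary of sets, convert into a list of sets removing any sets
--     that are subsets of other sets.
--     '''
--     res = [set(d) for d in list(candidates_map.values())]
--     res.sort(key=lambda x: len(x))
--     candidates_list = []
--     for i,a in enumerate(res):
--         for b in res[i+1:]:
--             if a.issubset(b):
--                 break
--         else:
--             candidates_list.append(a)
--     return candidates_list
-- ===== SOURCE B (Python) =====
-- def clean_dup_groups(candidates_map):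
--     '''
--     Given a dictionary of sets, convert into a list of sets removing any sets
--     that are subsets of other sets.
--     '''
--     res = sorted((set(d) for d in candidates_map.values()), key=len)
--     # Scan back-to-front, testing each set only against the sets already KEPT
--     # (a set has a later superset iff it has a later kept superset, by transitivity).
--     kept = []
--     for a in reversed(res):
--         if not any(a.issubset(k) for k in kept):
--             kept.append(a)
--     kept.reverse()
--     return kept
-- ===== Notes on version B (the rewrite author's own statement) =====
-- stated objective: alternative
-- what changed: Instead of scanning all later sets for each set, B builds the result back-to-front and tests each set for subset only against the already-kept sets (correct by transitivity of the subset relation).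
import Mathlib
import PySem

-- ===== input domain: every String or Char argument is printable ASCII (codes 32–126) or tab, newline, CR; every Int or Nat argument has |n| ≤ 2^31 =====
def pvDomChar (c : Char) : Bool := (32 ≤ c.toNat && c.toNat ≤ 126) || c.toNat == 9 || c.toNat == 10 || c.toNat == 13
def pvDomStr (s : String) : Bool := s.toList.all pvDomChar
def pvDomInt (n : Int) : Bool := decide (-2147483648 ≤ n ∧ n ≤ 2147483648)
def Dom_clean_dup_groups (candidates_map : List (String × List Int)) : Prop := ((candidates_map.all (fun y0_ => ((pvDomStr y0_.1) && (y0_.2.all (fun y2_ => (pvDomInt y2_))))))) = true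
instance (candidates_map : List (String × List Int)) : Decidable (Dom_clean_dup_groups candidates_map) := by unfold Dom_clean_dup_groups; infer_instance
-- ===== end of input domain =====

-- B keeps A's order but tests each set only against already-kept sets (back-to-front scan); same return value.
-- ===== PORT A =====
-- 'for i,a in enumerate(res): for b in res[i+1:]: if a.issubset(b): break / else: append(a)'
-- — res[i+1:] is exactly the tail after the current element, the break/else is List.any.
def cdgLoopA : List (PySem.Set Int) → List (PySem.Set Int)
  | [] => []
  | a :: rest =>
      if rest.any (fun b => PySem.Set.issubset a b) then cdgLoopA rest
      else a :: cdgLoopA rest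

def clean_dup_groups (candidates_map : List (String × List Int)) : List (List Int) :=
  let res := PySem.List.sorted ((candidates_map.map Prod.snd).map (fun d => PySem.Set.ofList d))
      (fun x => PySem.Set.len x) false
  cdgLoopA res

-- ===== PORT B =====
-- 'for a in reversed(res): … kept.append(a)' then 'kept.reverse()' — the reversed-order
-- foldl with append is List.foldr over res, then one final reverse.
def clean_dup_groups_alt (candidates_map : List (String × List Int)) : List (List Int) :=
  let res := PySem.List.sorted ((candidates_map.map Prod.snd).map (fun d => PySem.Set.ofList d))
      (fun x => PySem.Set.len x) false
  let kept := res.foldr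
      (fun a kept => if kept.any (fun k => PySem.Set.issubset a k) then kept else kept ++ [a]) []
  kept.reverse

-- ===== PRECONDITION & SPEC =====
def Spec_clean_dup_groups (candidates_map : List (String × List Int)) (out : List (List Int)) : Prop := out = clean_dup_groups_alt candidates_map
instance (candidates_map : List (String × List Int)) (out : List (List Int)) : Decidable (Spec_clean_dup_groups candidates_map out) := by unfold Spec_clean_dup_groups; infer_instance

-- ===== CLAIM (what is proved, stated in full; the proofs are below) =====
def Claim_equal_clean_dup_groups : Prop := ∀ (candidates_map : List (String × List Int)), Dom_clean_dup_groups candidates_map → Spec_clean_dup_groups candidates_map (clean_dup_groups candidates_map)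

-- ===== LEMMAS AND PROOFS =====
theorem issubset_trans {a c b : PySem.Set Int} (h1 : PySem.Set.issubset a c = true)
    (h2 : PySem.Set.issubset c b = true) : PySem.Set.issubset a b = true := by
  simp only [PySem.Set.issubset, List.all_eq_true] at *
  exact fun x hx => h2 x (by simpa using h1 x hx)

-- B's fold preserves "has a superset in the list": a superset dropped by the fold
-- has itself a kept superset, by transitivity.
theorem any_foldr_eq (a : PySem.Set Int) (l : List (PySem.Set Int)) :
    l.any (fun b => PySem.Set.issubset a b)
      = (l.foldr (fun a kept => if kept.any (fun k => PySem.Set.issubset a k) then kept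
            else kept ++ [a]) []).any (fun b => PySem.Set.issubset a b) := by
  induction l with
  | nil => rfl
  | cons c rest ih =>
    simp only [List.foldr, List.any_cons]
    by_cases hc : (rest.foldr (fun a kept => if kept.any (fun k => PySem.Set.issubset a k)
        then kept else kept ++ [a]) []).any (fun k => PySem.Set.issubset c k) = true
    · rw [if_pos hc, ih]
      by_cases hac : PySem.Set.issubset a c = true
      · rw [hac, Bool.true_or]
        obtain ⟨b, hb, hcb⟩ := List.any_eq_true.mp hc
        exact (List.any_eq_true.mpr ⟨b, hb, issubset_trans hac hcb⟩).symm
      · rw [Bool.not_eq_true] at hac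
        rw [hac, Bool.false_or]
    · rw [if_neg hc, List.any_append, ih, List.any_cons, List.any_nil, Bool.or_false,
        Bool.or_comm]

theorem loopA_eq_foldr (l : List (PySem.Set Int)) :
    cdgLoopA l = (l.foldr (fun a kept => if kept.any (fun k => PySem.Set.issubset a k) then kept
        else kept ++ [a]) []).reverse := by
  induction l with
  | nil => rfl
  | cons a rest ih =>
    simp only [cdgLoopA, List.foldr, any_foldr_eq a rest]
    by_cases h : (rest.foldr (fun a kept => if kept.any (fun k => PySem.Set.issubset a k)
        then kept else kept ++ [a]) []).any (fun b => PySem.Set.issubset a b) = true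
    · rw [if_pos h, if_pos h, ih]
    · rw [if_neg h, if_neg h, ih, List.reverse_append, List.reverse_cons, List.reverse_nil,
        List.nil_append, List.singleton_append]

-- ===== VERDICT (by name: the statement is the Claim_ definition above) =====
theorem clean_dup_groups_spec : Claim_equal_clean_dup_groups := by
  intro cm _
  unfold Spec_clean_dup_groups clean_dup_groups clean_dup_groups_alt
  exact loopA_eq_foldr _
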